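-- pv_equiv track=rewrite | github.com/MrBrantCode/unitest_baseline | mut_generate/mist_train_cf/cf_58893/solution.py | second_smallest_odd_element
-- ===== SOURCE A (Python) =====
-- def second_smallest_odd_element(lst: list):
--     odd_nums = [x for x in lst if x % 2 != 0]
--     if len(odd_nums) == 0: # No odd numbers
--         return None
--     elif len(odd_nums) == 1: # Only one odd number
--         return odd_nums[0]
--     else:
--         odd_nums.sort()
--         return odd_nums[1]
-- ===== SOURCE B (Python) =====
-- def second_smallest_odd_element(lst: list):
--     # One pass: track smallest odd, second-smallest odd, and the odd count;
--     # no intermediate list, no sort.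
--     first = None
--     second = None
--     count = 0
--     for x in lst:
--         if x % 2 != 0:
--             count += 1
--             if first is None or x < first:
--                 second = first
--                 first = x
--             elif second is None or x < second:
--                 second = x
--     if count == 0:
--         return None
--     elif count == 1:
--         return first
--     else:
--         return second
-- ===== Notes on version B (the rewrite author's own statement) =====
-- stated objective: simpler
-- what changed: Replaces A's filter-then-sort-then-index with a single pass that maintains the smallest odd, the second-smallest odd, and a count of odd elements.
import Mathlib
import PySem

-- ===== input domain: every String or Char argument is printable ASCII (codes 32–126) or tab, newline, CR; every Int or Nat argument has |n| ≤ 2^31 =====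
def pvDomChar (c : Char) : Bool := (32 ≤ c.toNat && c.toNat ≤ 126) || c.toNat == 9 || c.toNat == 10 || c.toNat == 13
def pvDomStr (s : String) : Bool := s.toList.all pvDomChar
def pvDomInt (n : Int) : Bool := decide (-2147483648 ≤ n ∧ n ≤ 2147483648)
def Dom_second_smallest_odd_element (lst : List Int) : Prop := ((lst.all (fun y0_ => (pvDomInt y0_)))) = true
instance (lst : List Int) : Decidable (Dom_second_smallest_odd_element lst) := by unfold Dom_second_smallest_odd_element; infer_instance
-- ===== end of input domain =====

-- B replaces A's filter-then-sort-then-index with a single pass keeping the two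
-- smallest odd values and an odd count (objective: simpler single scan).

-- ===== PORT A =====
-- odd_nums = [x for x in lst if x % 2 != 0]; return None / odd_nums[0] / sorted()[1]
def second_smallest_odd_element (lst : List Int) : Option Int :=
  let odd_nums := lst.filter (fun x => PySem.Int.mod x 2 != 0)
  if odd_nums.length = 0 then none
  else if odd_nums.length = 1 then PySem.List.pyGet? odd_nums 0
  else PySem.List.pyGet? (PySem.List.sorted odd_nums (fun x => x) false) 1

-- ===== PORT B =====
-- loop body for one odd element x: update (first, second, count)
def pvUpd (s : Option Int × Option Int × Int) (x : Int) :
    Option Int × Option Int × Int :=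
  let c := s.2.2 + 1
  if (match s.1 with | none => true | some f => decide (x < f)) then
    (some x, s.1, c)
  else if (match s.2.1 with | none => true | some sd => decide (x < sd)) then
    (s.1, some x, c)
  else (s.1, s.2.1, c)

-- loop body for any element: only odd x change the state
def pvStep (s : Option Int × Option Int × Int) (x : Int) :
    Option Int × Option Int × Int :=
  if PySem.Int.mod x 2 != 0 then pvUpd s x else s

def second_smallest_odd_element_alt (lst : List Int) : Option Int :=
  let st := lst.foldl pvStep (none, none, 0)
  if st.2.2 = 0 then none
  else if st.2.2 = 1 then st.1
  else st.2.1

-- ===== PRECONDITION & SPEC =====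
def Spec_second_smallest_odd_element (lst : List Int) (out : Option Int) : Prop := out = second_smallest_odd_element_alt lst
instance (lst : List Int) (out : Option Int) : Decidable (Spec_second_smallest_odd_element lst out) := by unfold Spec_second_smallest_odd_element; infer_instance

-- ===== CLAIM (what is proved, stated in full; the proofs are below) =====
def Claim_equal_second_smallest_odd_element : Prop := ∀ (lst : List Int), Dom_second_smallest_odd_element lst → Spec_second_smallest_odd_element lst (second_smallest_odd_element lst)

-- ===== LEMMAS AND PROOFS =====

-- the fold over a list computes the first two entries of its sorted order plus its length
theorem pvUpd_inv (l : List Int) :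
    l.foldl pvUpd (none, none, 0) =
      ((PySem.List.sorted l (fun x => x) false)[0]?,
       (PySem.List.sorted l (fun x => x) false)[1]?,
       (l.length : Int)) := by
  induction l using List.reverseRecOn with
  | nil => rfl
  | append_singleton l x ih =>
      rw [List.foldl_append, ih]
      have hs : ∀ (m : List Int),
          PySem.List.sorted (m ++ [x]) (fun y => y) false =
            PySem.List.insertBy (fun a b => decide (a < b)) x
              (PySem.List.sorted m (fun y => y) false) := by
        intro m
        rw [PySem.List.sorted_eq_foldl_insertBy, PySem.List.sorted_eq_foldl_insertBy,
          List.foldl_append]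
        rfl
      rw [hs]
      rcases h : PySem.List.sorted l (fun y => y) false with _ | ⟨a, _ | ⟨b, t⟩⟩ <;>
        simp [pvUpd, PySem.List.insertBy] <;> split_ifs <;> simp_all

theorem second_smallest_odd_element_eq (lst : List Int) :
    second_smallest_odd_element lst = second_smallest_odd_element_alt lst := by
  unfold second_smallest_odd_element second_smallest_odd_element_alt
  rw [show lst.foldl pvStep (none, none, 0)
        = (lst.filter (fun x => PySem.Int.mod x 2 != 0)).foldl pvUpd (none, none, 0) by
      rw [List.foldl_filter]; rfl]
  rw [pvUpd_inv]
  set odd := lst.filter (fun x => PySem.Int.mod x 2 != 0) with hodd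
  rcases h : odd with _ | ⟨a, _ | ⟨b, t⟩⟩
  · rfl
  · -- one odd element: sorted [a] = [a]
    simp [PySem.List.sorted_eq_foldl_insertBy, PySem.List.insertBy, PySem.List.pyGet?,
      PySem.List.pyIdx?]
  · -- at least two: both sides are the sorted list's second entry
    have h0 : ¬ ((a :: b :: t).length = 0) := by simp
    have h1 : ¬ ((a :: b :: t).length = 1) := by simp
    simp only [h0, if_false, h1]
    rw [show (1 : Int) = ((1 : Nat) : Int) by rfl, PySem.List.pyGet?_natCast]
    have e0 : ¬ (((t.length : Int) + 1 + 1) = 0) := by omega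
    have e1 : ¬ (((t.length : Int) + 1 + 1) = 1) := by omega
    simp only [List.length_cons]
    push_cast
    simp [e0, e1]

-- ===== VERDICT (by name: the statement is the Claim_ definition above) =====
theorem second_smallest_odd_element_spec : Claim_equal_second_smallest_odd_element := by
  intro lst _
  exact second_smallest_odd_element_eq lst
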